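-- pv_equiv track=rewrite | github.com/Shiv2157k/leet_code | goldman_sachs/last_substring_in_lexographical_order.py | last_substring_in_lexographic_order
-- ===== SOURCE A (Python) =====
-- def last_substring_in_lexographic_order(s: str) -> str:
--     """
--     Intuition: We need the first element and moving forward all to be the largest.
--     Approach: Three Pointer / Greedy
--     Time Complexity: O(N)
--     Space Complexity: O(1)
--     :param s:
--     :return:
--     """
--
--     marker = left = 0
--     right = 1
--     # "abczabzzcdzazc"
--     while marker + right < len(s):
--
--         # if they are same element increment the marker
--         # in this case both the right and left moves forward
--         if s[marker + left] == s[marker + right]: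
--             marker += 1
--             continue
--
--         # if the left character is greater than right character
--         # increment only the right pointer moves forward
--         if s[marker + left] > s[marker + right]:
--             right = right + marker + 1
--         # if the left character is lesser than the right character
--         # update both the left and right pointer
--         else:
--             left = max(right, left + marker)
--             right = left + 1
--         # re-set the marker
--         marker = 0
--     return s[left:]
-- ===== SOURCE B (Python) =====
-- def last_substring_in_lexographic_order(s: str) -> str:
--     return max((s[i:] for i in range(len(s))), default="")
-- ===== Notes on version B (the rewrite author's own statement) =====
-- stated objective: simpler
-- what changed: Replaces the three-pointer greedy scan and its mutable marker/left/right state by a one-line brute force: take the lexicographic maximum over all suffixes s[i:] (the answer is always a suffix), with default="" for the empty string.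
import Mathlib
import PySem

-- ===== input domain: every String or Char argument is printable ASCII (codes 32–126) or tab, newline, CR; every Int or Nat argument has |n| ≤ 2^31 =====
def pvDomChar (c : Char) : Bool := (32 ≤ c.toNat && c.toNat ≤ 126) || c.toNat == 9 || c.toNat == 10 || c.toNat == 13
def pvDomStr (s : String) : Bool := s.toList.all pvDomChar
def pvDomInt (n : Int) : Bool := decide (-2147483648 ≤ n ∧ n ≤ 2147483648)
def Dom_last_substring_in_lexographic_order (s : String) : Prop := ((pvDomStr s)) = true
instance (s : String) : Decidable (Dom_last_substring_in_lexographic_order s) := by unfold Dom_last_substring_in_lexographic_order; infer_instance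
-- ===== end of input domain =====

-- B replaces A's three-pointer greedy scan by the one-line brute force 'max of all suffixes' (objective: simpler).

-- ===== PORT A =====
-- The while loop of A, on σ = s.toList, state (marker, left, right).
-- Python's s[marker+left] / s[marker+right] are ported with getD: on every state this
-- loop reaches from (0, 0, 1) we have left < right, so both indices are < σ.length
-- whenever the guard marker + right < σ.length holds, and getD is exact there
-- (the Python indexing never raises).
def loopA (σ : List Char) (marker left right : Nat) : Nat :=
  if _h : marker + right < σ.length then
    -- if s[marker + left] == s[marker + right]: marker += 1; continue
    if σ.getD (marker + left) 'A' = σ.getD (marker + right) 'A' then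
      loopA σ (marker + 1) left right
    -- if s[marker + left] > s[marker + right]: right = right + marker + 1; marker = 0
    else if σ.getD (marker + right) 'A' < σ.getD (marker + left) 'A' then
      loopA σ 0 left (right + marker + 1)
    -- else: left = max(right, left + marker); right = left + 1; marker = 0
    else
      loopA σ 0 (max right (left + marker)) (max right (left + marker) + 1)
  else left
termination_by (σ.length - right, σ.length - marker)
decreasing_by
  · apply Prod.Lex.right; omega
  · apply Prod.Lex.left; omega
  · apply Prod.Lex.left; omega

-- return s[left:]  (marker = left = 0, right = 1 initially)
def last_substring_in_lexographic_order (s : String) : String :=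
  PySem.Str.slice s (some ((loopA s.toList 0 0 1 : Nat) : Int)) none

-- ===== PORT B =====
-- return max((s[i:] for i in range(len(s))), default="")
def last_substring_in_lexographic_order_alt (s : String) : String :=
  PySem.List.maxD
    ((PySem.List.pyRange 0 (PySem.Str.len s) 1).map (fun i => PySem.Str.slice s (some i) none))
    (fun x => x) ""

-- ===== PRECONDITION & SPEC =====
def Spec_last_substring_in_lexographic_order (s : String) (out : String) : Prop := out = last_substring_in_lexographic_order_alt s
instance (s : String) (out : String) : Decidable (Spec_last_substring_in_lexographic_order s out) := by unfold Spec_last_substring_in_lexographic_order; infer_instance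

-- ===== CLAIM (what is proved, stated in full; the proofs are below) =====
def Claim_equal_last_substring_in_lexographic_order : Prop := ∀ (s : String), Dom_last_substring_in_lexographic_order s → Spec_last_substring_in_lexographic_order s (last_substring_in_lexographic_order s)

-- ===== LEMMAS AND PROOFS =====

-- Lex comparison of two suffixes of σ that agree on their first m characters and
-- then differ: drop a σ < drop b σ.
theorem lexDiff (σ : List Char) (m : Nat) : ∀ (a b : Nat),
    (∀ e, e < m → σ.getD (a + e) 'A' = σ.getD (b + e) 'A') →
    a + m < σ.length → b + m < σ.length →
    σ.getD (a + m) 'A' < σ.getD (b + m) 'A' →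
    List.Lex (· < ·) (σ.drop a) (σ.drop b) := by
  induction m with
  | zero =>
    intro a b _ ha hb hlt
    simp only [Nat.add_zero] at ha hb hlt
    rw [List.drop_eq_getElem_cons ha, List.drop_eq_getElem_cons hb]
    exact List.Lex.rel (by rwa [List.getD_eq_getElem σ _ ha, List.getD_eq_getElem σ _ hb] at hlt)
  | succ m ih =>
    intro a b heq ha hb hlt
    have ha0 : a < σ.length := by omega
    have hb0 : b < σ.length := by omega
    have h0 : σ[a] = σ[b] := by
      have h := heq 0 (by omega)
      rw [Nat.add_zero, Nat.add_zero, List.getD_eq_getElem σ 'A' ha0, List.getD_eq_getElem σ 'A' hb0] at h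
      exact h
    rw [List.drop_eq_getElem_cons ha0, List.drop_eq_getElem_cons hb0, h0]
    apply List.Lex.cons
    apply ih (a + 1) (b + 1)
    · intro e he
      have := heq (e + 1) (by omega)
      have e1 : a + 1 + e = a + (e + 1) := by omega
      have e2 : b + 1 + e = b + (e + 1) := by omega
      rw [e1, e2]; exact this
    · omega
    · omega
    · have e1 : a + 1 + m = a + (m + 1) := by omega
      have e2 : b + 1 + m = b + (m + 1) := by omega
      rw [e1, e2]; exact hlt

-- A suffix that is a proper prefix of another suffix is Lex-smaller: if b < a < (or =) σ.length,
-- b is a valid index, and σ agrees at a+e and b+e for every valid e, then drop a σ < drop b σ.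
theorem lexPrefix (σ : List Char) : ∀ (k a b : Nat),
    σ.length - a ≤ k → b < a → b < σ.length →
    (∀ e, a + e < σ.length → σ.getD (a + e) 'A' = σ.getD (b + e) 'A') →
    List.Lex (· < ·) (σ.drop a) (σ.drop b) := by
  intro k
  induction k with
  | zero =>
    intro a b hk hba hb _
    have hna : σ.length ≤ a := by omega
    rw [List.drop_eq_nil_of_le hna, List.drop_eq_getElem_cons hb]
    exact List.Lex.nil
  | succ k ih =>
    intro a b hk hba hb heq
    by_cases ha : a < σ.length
    · have h0 : σ[a] = σ[b] := by
        have h := heq 0 (by omega)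
        rw [Nat.add_zero, Nat.add_zero, List.getD_eq_getElem σ 'A' ha, List.getD_eq_getElem σ 'A' hb] at h
        exact h
      rw [List.drop_eq_getElem_cons ha, List.drop_eq_getElem_cons hb, h0]
      apply List.Lex.cons
      apply ih (a + 1) (b + 1) (by omega) (by omega) (by omega)
      intro e he
      have := heq (e + 1) (by omega)
      have e1 : a + 1 + e = a + (e + 1) := by omega
      have e2 : b + 1 + e = b + (e + 1) := by omega
      rw [e1, e2]; exact this
    · rw [List.drop_eq_nil_of_le (by omega), List.drop_eq_getElem_cons hb]
      exact List.Lex.nil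

-- Loop invariant / correctness: from a state satisfying the invariant, the loop returns
-- the start index of the lexicographically greatest suffix of σ.
theorem loop_spec (σ : List Char) : ∀ (marker left right : Nat),
    left < right → left < σ.length →
    (∀ d, d < marker → right + d < σ.length →
      σ.getD (left + d) 'A' = σ.getD (right + d) 'A') →
    (∀ t, t < right → t ≠ left →
      ∃ u, u < σ.length ∧ List.Lex (· < ·) (σ.drop t) (σ.drop u)) →
    loopA σ marker left right < σ.length ∧
      ∀ t, t < σ.length → t ≠ loopA σ marker left right →
        List.Lex (· < ·) (σ.drop t) (σ.drop (loopA σ marker left right)) := by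
  intro marker left right
  fun_induction loopA σ marker left right with
  | case1 marker left right hguard hEq ih =>
    intro h1 h2 h3 h4
    apply ih h1 h2 ?_ h4
    intro d hd hdn
    rcases Nat.lt_or_ge d marker with hdm | hdm
    · exact h3 d hdm hdn
    · have hdm' : d = marker := by omega
      subst hdm'
      have e1 : left + d = d + left := by omega
      have e2 : right + d = d + right := by omega
      rw [e1, e2]; exact hEq
  | case2 marker left right hguard hEq hGt ih =>
    intro h1 h2 h3 h4
    apply ih (by omega) h2 (by omega) ?_
    intro t ht htl
    rcases Nat.lt_or_ge t right with htr | htr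
    · exact h4 t htr htl
    · -- t = right + d with d ≤ marker : witness left + d
      obtain ⟨d, rfl⟩ : ∃ d, t = right + d := ⟨t - right, by omega⟩
      have hd : d ≤ marker := by omega
      refine ⟨left + d, by omega, ?_⟩
      apply lexDiff σ (marker - d) (right + d) (left + d)
      · intro e he
        have h3' := h3 (d + e) (by omega) (by omega)
        have e1 : right + d + e = right + (d + e) := by omega
        have e2 : left + d + e = left + (d + e) := by omega
        rw [e1, e2, h3']
      · omega
      · omega
      · have e1 : right + d + (marker - d) = marker + right := by omega
        have e2 : left + d + (marker - d) = marker + left := by omega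
        rw [e1, e2]; exact hGt
  | case3 marker left right hguard hEq hGt ih =>
    intro h1 h2 h3 h4
    have hLt : σ.getD (marker + left) 'A' < σ.getD (marker + right) 'A' :=
      lt_of_le_of_ne (not_lt.mp hGt) hEq
    -- key step lemma: every t ∈ [left, left + marker] loses to t + (right - left)
    have key : ∀ t, left ≤ t → t ≤ left + marker →
        List.Lex (· < ·) (σ.drop t) (σ.drop (t + (right - left))) := by
      intro t htl htm
      apply lexDiff σ (left + marker - t) t (t + (right - left))
      · intro e he
        have h3' := h3 (t + e - left) (by omega) (by omega)
        have e1 : t + e = left + (t + e - left) := by omega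
        have e2 : t + (right - left) + e = right + (t + e - left) := by omega
        rw [e1, e2, h3']
      · have e1 : t + (left + marker - t) = marker + left := by omega
        rw [e1]; omega
      · have e2 : t + (right - left) + (left + marker - t) = marker + right := by omega
        rw [e2]; omega
      · have e1 : t + (left + marker - t) = marker + left := by omega
        have e2 : t + (right - left) + (left + marker - t) = marker + right := by omega
        rw [e1, e2]; exact hLt
    apply ih (by omega) (by omega) (by omega) ?_
    intro t ht htne
    by_cases htl : t = left
    · subst htl
      refine ⟨t + (right - t), by omega, ?_⟩
      exact key t (by omega) (by omega)
    · rcases Nat.lt_or_ge t right with htr | htr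
      · exact h4 t htr htl
      · -- right ≤ t < max right (left + marker), so t < left + marker
        have htm : t < left + marker := by omega
        refine ⟨t + (right - left), by omega, ?_⟩
        exact key t (by omega) (by omega)
  | case4 marker left right hguard =>
    intro _h1 h2 h3 _h4
    refine ⟨h2, ?_⟩
    -- t < right case needs the eliminated-set invariant; t ≥ right is a proper
    -- prefix of the suffix at left + (t - right); both contradict maximality of
    -- the lexicographically greatest suffix, whose start must therefore be left.
    obtain ⟨m, hm_mem, hm_max⟩ :=
      Finset.exists_max_image (Finset.range σ.length) (fun t => σ.drop t)
        ⟨left, Finset.mem_range.mpr h2⟩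
    have hmn : m < σ.length := Finset.mem_range.mp hm_mem
    have hml : m = left := by
      by_contra hne
      rcases Nat.lt_or_ge m right with hmr | hmr
      · obtain ⟨u, hu, hlex⟩ := _h4 m hmr hne
        have hle : σ.drop u ≤ σ.drop m := hm_max u (Finset.mem_range.mpr hu)
        have hlt : σ.drop m < σ.drop u := (List.lt_iff_lex_lt _ _).mpr hlex
        exact absurd hle (not_le_of_gt hlt)
      · -- m = right + d with d < marker (since length ≤ marker + right)
        have hlex : List.Lex (· < ·) (σ.drop m) (σ.drop (left + (m - right))) := by
          apply lexPrefix σ σ.length m (left + (m - right)) (by omega) (by omega) (by omega)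
          intro e he
          have h3' := h3 (m - right + e) (by omega) (by omega)
          have e1 : m + e = right + (m - right + e) := by omega
          have e2 : left + (m - right) + e = left + (m - right + e) := by omega
          rw [e1, e2, h3']
        have hle : σ.drop (left + (m - right)) ≤ σ.drop m :=
          hm_max _ (Finset.mem_range.mpr (by omega))
        have hlt : σ.drop m < σ.drop (left + (m - right)) := (List.lt_iff_lex_lt _ _).mpr hlex
        exact absurd hle (not_le_of_gt hlt)
    subst hml
    intro t ht htne
    have hle : σ.drop t ≤ σ.drop m := hm_max t (Finset.mem_range.mpr ht)
    have hlen : (σ.drop t).length ≠ (σ.drop m).length := by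
      rw [List.length_drop, List.length_drop]; omega
    have hne' : σ.drop t ≠ σ.drop m := fun h => hlen (congrArg List.length h)
    exact (List.lt_iff_lex_lt _ _).mp (lt_of_le_of_ne hle hne')

-- s[k:] for a natural k is drop k.
theorem sliceFrom (s : String) (k : Nat) :
    PySem.Str.slice s (some (k : Int)) none = String.ofList (s.toList.drop k) := by
  simp [PySem.Str.slice, pysem]

-- Python max picks the unique strict maximum.
theorem max?_eq_of_unique (xs : List String) (x : String) (hmem : x ∈ xs)
    (hstrict : ∀ y ∈ xs, y ≠ x → y < x) : PySem.List.max? xs (fun v => v) = some x := by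
  cases hmax : PySem.List.max? xs (fun v => v) with
  | none =>
    rw [(PySem.List.max?_eq_none_iff xs _).mp hmax] at hmem
    exact absurd hmem List.not_mem_nil
  | some m =>
    have hm : m ∈ xs := PySem.List.max?_mem hmax
    have hxm : x ≤ m := PySem.List.max?_isMax hmax x hmem
    by_cases h : m = x
    · rw [h]
    · exact absurd hxm (not_le_of_gt (hstrict m hm h))

-- B computes the maximum of the (distinct) suffixes of s.
theorem alt_eq_max (s : String) :
    last_substring_in_lexographic_order_alt s =
      PySem.List.maxD
        ((List.range s.toList.length).map (fun t => String.ofList (s.toList.drop t)))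
        (fun x => x) "" := by
  unfold last_substring_in_lexographic_order_alt
  rw [PySem.Str.len_eq, PySem.List.pyRange_zero_natCast, List.map_map]
  congr 1
  apply List.map_congr_left
  intro k _
  exact sliceFrom s k

-- ===== VERDICT (by name: the statement is the Claim_ definition above) =====
theorem last_substring_in_lexographic_order_spec : Claim_equal_last_substring_in_lexographic_order := by
  intro s _hdom
  show last_substring_in_lexographic_order s = last_substring_in_lexographic_order_alt s
  rw [alt_eq_max]
  unfold last_substring_in_lexographic_order
  rw [sliceFrom]
  rcases Nat.eq_zero_or_pos s.toList.length with hn | hn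
  · -- empty string: both sides are ""
    have hσ : s.toList = [] := List.length_eq_zero_iff.mp hn
    rw [hσ]
    simp [PySem.List.maxD, PySem.List.max?]
  · obtain ⟨hLn, hLmax⟩ :=
      loop_spec s.toList 0 0 1 (by omega) (by omega)
        (fun d hd _ => absurd hd (by omega))
        (fun t ht htne => absurd (by omega : t = 0) htne)
    have hmem : String.ofList (s.toList.drop (loopA s.toList 0 0 1)) ∈
        (List.range s.toList.length).map (fun t => String.ofList (s.toList.drop t)) :=
      List.mem_map.mpr ⟨loopA s.toList 0 0 1, List.mem_range.mpr hLn, rfl⟩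
    have hstrict : ∀ y ∈ (List.range s.toList.length).map
          (fun t => String.ofList (s.toList.drop t)),
        y ≠ String.ofList (s.toList.drop (loopA s.toList 0 0 1)) →
        y < String.ofList (s.toList.drop (loopA s.toList 0 0 1)) := by
      intro y hy hne
      obtain ⟨t, htn, rfl⟩ := List.mem_map.mp hy
      have htL : t ≠ loopA s.toList 0 0 1 := by rintro rfl; exact hne rfl
      have hlex := hLmax t (List.mem_range.mp htn) htL
      rw [String.lt_iff_toList_lt]
      simp only [String.toList_ofList]
      exact (List.lt_iff_lex_lt _ _).mpr hlex
    rw [PySem.List.maxD, max?_eq_of_unique _ _ hmem hstrict]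
    rfl
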